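-- pv_equiv track=rewrite | github.com/ankitanandBCA/Python_CollegeAssignment | Lab2/q6.py | is_consogram
-- ===== SOURCE A (Python) =====
-- VOWELS = {'a', 'e', 'i', 'o', 'u'}
--
-- def is_consogram(text: str) -> bool:
--     """
--     Checks if a string is a consogram (each consonant appears at most once).
--     """
--     found_consonants = set()
--     for char in text.lower():
--         # Check if the character is a consonant
--         if 'a' <= char <= 'z' and char not in VOWELS:
--             # If we've already seen this consonant, it's not a consogram
--             if char in found_consonants:
--                 return False
--             # Otherwise, add it to our set of found consonants
--             found_consonants.add(char)
--     # If the loop completes, no consonants were repeated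
--     return True
-- ===== SOURCE B (Python) =====
-- CONSONANTS = "bcdfghjklmnpqrstvwxyz"
--
-- def is_consogram(text: str) -> bool:
--     low = text.lower()
--     return all(sum(ch == c for ch in low) <= 1 for c in CONSONANTS)
-- ===== Notes on version B (the rewrite author's own statement) =====
-- stated objective: alternative
-- what changed: B inverts the traversal: instead of A's single scan over the text with a growing seen-set and early return, it iterates over the fixed 21-letter consonant alphabet and checks that each letter occurs at most once in the lowered text.
import Mathlib
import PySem

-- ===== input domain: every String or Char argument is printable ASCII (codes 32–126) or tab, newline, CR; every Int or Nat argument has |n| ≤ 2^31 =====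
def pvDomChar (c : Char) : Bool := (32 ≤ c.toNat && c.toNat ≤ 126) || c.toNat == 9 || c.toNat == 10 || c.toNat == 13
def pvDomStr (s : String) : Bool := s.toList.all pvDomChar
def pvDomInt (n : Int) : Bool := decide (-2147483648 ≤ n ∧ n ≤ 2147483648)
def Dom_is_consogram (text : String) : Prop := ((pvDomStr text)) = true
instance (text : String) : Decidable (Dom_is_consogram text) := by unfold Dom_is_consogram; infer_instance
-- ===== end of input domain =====

-- B replaces A's single stateful scan (growing seen-set, early return) by iterating over the fixed
-- 21-consonant alphabet and checking each letter's occurrence count in the lowered text; same result,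
-- a different traversal (alternative decomposition, no asymptotic change).

-- shared: 'a' <= c <= 'z' and c not in VOWELS (A's Python tests exactly this)
def pvIsCons (c : Char) : Bool :=
  ('a' ≤ c && c ≤ 'z') && !(c == 'a' || c == 'e' || c == 'i' || c == 'o' || c == 'u')

-- ===== PORT A =====
-- the for-loop with early return, over the growing seen-set
def pvGoA : List Char → PySem.Set Char → Bool
  | [], _ => true
  | c :: rest, found =>
    if pvIsCons c then
      if PySem.Set.contains found c then false
      else pvGoA rest (PySem.Set.add found c)
    else pvGoA rest found

def is_consogram (text : String) : Bool :=
  pvGoA (PySem.Chars.lower text.toList) PySem.Set.empty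

-- ===== PORT B =====
-- CONSONANTS = "bcdfghjklmnpqrstvwxyz"
def pvConsonants : List Char :=
  ['b','c','d','f','g','h','j','k','l','m','n','p','q','r','s','t','v','w','x','y','z']

-- all(sum(ch == c for ch in low) <= 1 for c in CONSONANTS)
def is_consogram_alt (text : String) : Bool :=
  let low := PySem.Chars.lower text.toList
  pvConsonants.all (fun c =>
    decide ((low.foldl (fun acc ch => acc + (if ch == c then 1 else 0)) (0 : Int)) ≤ 1))

-- ===== PRECONDITION & SPEC =====
def Spec_is_consogram (text : String) (out : Bool) : Prop := out = is_consogram_alt text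
instance (text : String) (out : Bool) : Decidable (Spec_is_consogram text out) := by unfold Spec_is_consogram; infer_instance

-- ===== CLAIM (what is proved, stated in full; the proofs are below) =====
def Claim_equal_is_consogram : Prop := ∀ (text : String), Dom_is_consogram text → Spec_is_consogram text (is_consogram text)

-- ===== LEMMAS AND PROOFS =====

lemma char_eq_of_toNat {c d : Char} (h : c.toNat = d.toNat) : c = d := by
  apply Char.ext
  exact UInt32.toNat_inj.mp h

-- A's consonant test picks out exactly the 21 letters B iterates over
lemma pvIsCons_iff_mem (c : Char) : pvIsCons c = true ↔ c ∈ pvConsonants := by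
  constructor
  · intro h
    simp only [pvIsCons, Bool.and_eq_true, Bool.not_eq_true', Bool.or_eq_false_iff,
      beq_eq_false_iff_ne, decide_eq_true_eq] at h
    obtain ⟨⟨h1, h2⟩, ⟨⟨⟨⟨h3, h4⟩, h5⟩, h6⟩, h7⟩⟩ := h
    have n1 : 97 ≤ c.toNat := h1
    have n2 : c.toNat ≤ 122 := h2
    have e1 : c.toNat ≠ 97 := fun he => h3 (char_eq_of_toNat he)
    have e2 : c.toNat ≠ 101 := fun he => h4 (char_eq_of_toNat he)
    have e3 : c.toNat ≠ 105 := fun he => h5 (char_eq_of_toNat he)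
    have e4 : c.toNat ≠ 111 := fun he => h6 (char_eq_of_toNat he)
    have e5 : c.toNat ≠ 117 := fun he => h7 (char_eq_of_toNat he)
    have hm : c.toNat ∈ pvConsonants.map Char.toNat := by
      have hmap : pvConsonants.map Char.toNat =
          [98, 99, 100, 102, 103, 104, 106, 107, 108, 109, 110, 112, 113, 114, 115, 116, 118, 119, 120, 121, 122] := by decide
      rw [hmap]
      simp only [List.mem_cons, List.not_mem_nil, or_false]
      omega
    obtain ⟨d, hd, hdn⟩ := List.mem_map.mp hm
    rwa [char_eq_of_toNat hdn.symm]
  · intro h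
    fin_cases h <;> decide

lemma add_of_not_mem (s : List Char) (y : Char) (hm : y ∉ s) : PySem.Set.add s y = s ++ [y] := by
  simp [PySem.Set.add, PySem.Set.contains]; exact hm

-- A's scan succeeds iff the seen-set extended by the remaining consonants stays duplicate-free
lemma goA_iff (xs : List Char) : ∀ (s : List Char), s.Nodup →
    (pvGoA xs s = true ↔ (s ++ xs.filter pvIsCons).Nodup) := by
  induction xs with
  | nil => intro s hs; simpa [pvGoA] using hs
  | cons c xs ih =>
    intro s hs
    by_cases hc : pvIsCons c = true
    · by_cases hm : c ∈ s
      · have hct : PySem.Set.contains s c = true := by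
          simp [PySem.Set.contains]; exact hm
        simp only [pvGoA, hc, if_true, hct]
        constructor
        · intro h; cases h
        · intro h
          exact absurd ((List.nodup_append.mp h).2.2 c hm c (by simp [hc]) rfl)
            (fun h => h)
      · have hct : PySem.Set.contains s c = false := by
          simp [PySem.Set.contains]; exact hm
        have hnd : (s ++ [c]).Nodup := by
          simp [List.nodup_append, hs]
          intro a ha rfl; exact hm ha
        simp only [pvGoA, hc, if_true, hct, Bool.false_eq_true, if_false,
          add_of_not_mem s c hm]
        rw [ih _ hnd]
        constructor
        · intro h
          simpa [List.append_assoc, List.singleton_append, List.filter_cons, hc] using h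
        · intro h
          simpa [List.append_assoc, List.singleton_append, List.filter_cons, hc] using h
    · simp only [pvGoA, hc, Bool.false_eq_true, if_false]
      rw [ih _ hs]
      simp [hc]

-- B's per-letter sum is the occurrence count
lemma sum_eq_count (l : List Char) (c : Char) :
    l.foldl (fun acc ch => acc + (if ch == c then 1 else 0)) (0 : Int) = (l.count c : Int) := by
  have hfun : (fun (acc : Int) ch => acc + (if ch == c then 1 else 0)) =
      (fun (acc : Int) ch => if ch == c then acc + 1 else acc) := by
    funext acc ch
    split <;> omega
  rw [hfun, PySem.List.foldl_beq_add_one]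
  omega

-- the bridge: filtered-consonant Nodup ↔ every alphabet consonant occurs at most once
lemma nodup_iff_counts (l : List Char) :
    (l.filter pvIsCons).Nodup ↔ ∀ c ∈ pvConsonants, l.count c ≤ 1 := by
  rw [List.nodup_iff_count_le_one]
  constructor
  · intro h c hc
    have hp : pvIsCons c = true := (pvIsCons_iff_mem c).mpr hc
    have := h c
    rwa [List.count_filter hp] at this
  · intro h a
    by_cases hp : pvIsCons a = true
    · rw [List.count_filter hp]
      exact h a ((pvIsCons_iff_mem a).mp hp)
    · have : a ∉ l.filter pvIsCons := by
        intro hmem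
        exact hp (List.of_mem_filter hmem)
      simp [List.count_eq_zero.mpr this]

-- ===== VERDICT (by name: the statement is the Claim_ definition above) =====
theorem is_consogram_spec : Claim_equal_is_consogram := by
  intro text _
  unfold Spec_is_consogram is_consogram is_consogram_alt
  set low := PySem.Chars.lower text.toList with hlow
  have hA : pvGoA low PySem.Set.empty = true ↔ (low.filter pvIsCons).Nodup := by
    simpa [PySem.Set.empty] using goA_iff low [] List.nodup_nil
  have hB : (pvConsonants.all (fun c =>
      decide ((low.foldl (fun acc ch => acc + (if ch == c then 1 else 0)) (0 : Int)) ≤ 1)) = true)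
      ↔ ∀ c ∈ pvConsonants, low.count c ≤ 1 := by
    simp only [List.all_eq_true, decide_eq_true_eq, sum_eq_count]
    constructor
    · intro h c hc
      have := h c hc
      omega
    · intro h c hc
      have := h c hc
      omega
  rcases Bool.eq_false_or_eq_true (pvGoA low PySem.Set.empty) with h | h <;>
    rcases Bool.eq_false_or_eq_true (pvConsonants.all (fun c =>
      decide ((low.foldl (fun acc ch => acc + (if ch == c then 1 else 0)) (0 : Int)) ≤ 1))) with h2 | h2 <;>
      simp_all [nodup_iff_counts]
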